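-- pv_equiv track=rewrite | github.com/vaisakhsrinivas/Python | SumLengthNonOverlappingsubArray.py | SumLength
-- ===== SOURCE A (Python) =====
-- def SumLength(arr, n, k):
--     sum = 0
--
--     for i in range(n):
--
--         count = 0
--         maxsubelementfound = 0
--
--         while i < n and arr[i] <= k:
--             count = count + 1
--             if arr[i] == k:
--                 maxsubelementfound = 1
--             i = i + 1
--
--         if maxsubelementfound == 1:
--             sum = sum + count
--
--         while i < n and arr[i] > k:
--             i = i + 1
--
--     return sum
-- ===== SOURCE B (Python) =====
-- def SumLength(arr, n, k):
--     # Single backward pass: maintain the length of the current run of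
--     # elements <= k and whether it contains k; each position whose run
--     # contains k contributes its run length.
--     total = 0
--     run = 0
--     has_k = False
--     for x in reversed(arr[:max(n, 0)]):
--         if x > k:
--             run = 0
--             has_k = False
--         else:
--             run += 1
--             if x == k:
--                 has_k = True
--         if has_k:
--             total += run
--     return total
-- ===== Notes on version B (the rewrite author's own statement) =====
-- stated objective: faster
-- what changed: Replaces A's per-start-index rescan (an inner while re-walking the run for every i in range(n)) by a single backward pass that maintains the current run length and whether the run contains k.
import Mathlib
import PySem

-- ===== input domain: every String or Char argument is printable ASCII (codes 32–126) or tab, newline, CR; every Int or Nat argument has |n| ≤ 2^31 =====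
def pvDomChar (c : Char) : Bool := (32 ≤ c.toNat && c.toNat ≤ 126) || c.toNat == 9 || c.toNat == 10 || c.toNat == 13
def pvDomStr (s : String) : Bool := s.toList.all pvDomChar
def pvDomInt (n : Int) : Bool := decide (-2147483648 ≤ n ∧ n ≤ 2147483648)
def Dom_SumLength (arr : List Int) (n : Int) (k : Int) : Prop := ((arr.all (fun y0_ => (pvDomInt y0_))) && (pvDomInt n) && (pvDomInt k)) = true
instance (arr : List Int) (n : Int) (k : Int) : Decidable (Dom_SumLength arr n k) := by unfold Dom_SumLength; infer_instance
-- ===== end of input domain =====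

-- B replaces A's quadratic per-start rescan by one backward linear pass (objective: faster).

-- ===== PORT A =====
-- first inner while: advances i over the run of elements <= k, counting and flagging k
def pvWhile1 (arr : List Int) (n k : Int) (i count flag : Int) : Int × Int × Int :=
  if _h : i < n then
    match PySem.List.pyGet? arr i with
    | some v =>
        if v ≤ k then
          pvWhile1 arr n k (i + 1) (count + 1) (if v = k then 1 else flag)
        else (count, flag, i)
    | none => (count, flag, i)   -- IndexError region: excluded by Pre_SumLength
  else (count, flag, i)
termination_by (n - i).toNat
decreasing_by omega

-- second inner while: skips elements > k (its effect on i is discarded by the for loop)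
def pvWhile2 (arr : List Int) (n k : Int) (i : Int) : Int :=
  if _h : i < n then
    match PySem.List.pyGet? arr i with
    | some v => if v > k then pvWhile2 arr n k (i + 1) else i
    | none => i
  else i
termination_by (n - i).toNat
decreasing_by omega

def SumLength (arr : List Int) (n : Int) (k : Int) : Int :=
  (PySem.List.pyRange 0 n 1).foldl
    (fun sum i =>
      let r := pvWhile1 arr n k i 0 0
      let _ := pvWhile2 arr n k r.2.2   -- Python's second while; its result is unused
      if r.2.1 = 1 then sum + r.1 else sum)
    0

-- ===== PORT B =====
-- loop body of Source B: state (total, run, has_k)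
def pvStep (k : Int) (s : Int × Int × Bool) (x : Int) : Int × Int × Bool :=
  let run := if x > k then 0 else s.2.1 + 1
  let hask := if x > k then false else (if x = k then true else s.2.2)
  (if hask then s.1 + run else s.1, run, hask)

-- arr[:max(n, 0)] = List.take (max n 0).toNat arr (the bound is nonnegative)
def SumLength_alt (arr : List Int) (n : Int) (k : Int) : Int :=
  ((arr.take (max n 0).toNat).reverse.foldl (pvStep k) (0, 0, false)).1

-- ===== PRECONDITION & SPEC =====
-- Pre_ excludes exactly the inputs where A raises IndexError (n larger than the list).
def Pre_SumLength (arr : List Int) (n : Int) (k : Int) : Prop := n ≤ (arr.length : Int)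
instance (arr : List Int) (n : Int) (k : Int) : Decidable (Pre_SumLength arr n k) := by
  unfold Pre_SumLength; infer_instance

def pvWitness_SumLength : List Int × Int × Int := ([2, 1, 3, 2], 4, 2)


def Spec_SumLength (arr : List Int) (n : Int) (k : Int) (out : Int) : Prop := out = SumLength_alt arr n k
instance (arr : List Int) (n : Int) (k : Int) (out : Int) : Decidable (Spec_SumLength arr n k out) := by
  unfold Spec_SumLength; infer_instance

-- ===== CLAIM (what is proved, stated in full; the proofs are below) =====
def Claim_equal_SumLength : Prop := ∀ (arr : List Int) (n : Int) (k : Int), Dom_SumLength arr n k → Pre_SumLength arr n k → Spec_SumLength arr n k (SumLength arr n k)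

-- ===== LEMMAS AND PROOFS =====

-- the run of elements ≤ k starting at the head
def pvTw (k : Int) (l : List Int) : List Int := l.takeWhile (fun x => decide (x ≤ k))

-- contribution of one start position
def pvG (k : Int) (l : List Int) : Int := if k ∈ pvTw k l then ((pvTw k l).length : Int) else 0

-- reference value: sum of pvG over all suffixes
def pvSpec (k : Int) : List Int → Int
  | [] => 0
  | x :: xs => pvG k (x :: xs) + pvSpec k xs

theorem pvTw_cons_le {k x : Int} (xs : List Int) (h : x ≤ k) :
    pvTw k (x :: xs) = x :: pvTw k xs := by
  simp [pvTw, List.takeWhile, h]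

theorem pvTw_cons_gt {k x : Int} (xs : List Int) (h : ¬ x ≤ k) :
    pvTw k (x :: xs) = [] := by
  simp [pvTw, List.takeWhile, h]

-- ---- B side ----
theorem foldB (k : Int) (u : List Int) :
    u.reverse.foldl (pvStep k) (0, 0, false) =
      (pvSpec k u, ((pvTw k u).length : Int), decide (k ∈ pvTw k u)) := by
  induction u with
  | nil => simp [pvTw, pvSpec]
  | cons x u₀ ih =>
      rw [List.reverse_cons, List.foldl_append, ih]
      by_cases h : x ≤ k
      · rw [pvTw_cons_le _ h]
        have hx : ¬ x > k := by omega
        by_cases hk : x = k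
        · subst hk
          simp [pvStep, pvSpec, pvG, pvTw_cons_le _ h, List.mem_cons]
          ring
        · have hkx : ¬ (k = x) := fun hh => hk hh.symm
          by_cases hm : k ∈ pvTw k u₀
          · simp [pvStep, pvSpec, pvG, pvTw_cons_le _ h, hx, hk, hm, List.mem_cons, hkx]
            ring
          · simp [pvStep, pvSpec, pvG, pvTw_cons_le _ h, hx, hk, hm, List.mem_cons, hkx]
      · have hx : x > k := by omega
        simp [pvStep, pvSpec, pvG, pvTw_cons_gt _ h, hx]

-- ---- A side ----
theorem pvWhile1_eq (arr : List Int) (n k : Int) (hn : n ≤ (arr.length : Int)) :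
    ∀ (m : Nat) (i count flag : Int), 0 ≤ i → (n - i).toNat = m →
      pvWhile1 arr n k i count flag =
        (count + (((pvTw k ((arr.take n.toNat).drop i.toNat)).length : Int)),
         (if k ∈ pvTw k ((arr.take n.toNat).drop i.toNat) then 1 else flag),
         i + ((pvTw k ((arr.take n.toNat).drop i.toNat)).length : Int)) := by
  intro m
  induction m with
  | zero =>
      intro i count flag hi hm
      have hni : n ≤ i := by omega
      have hdrop : (arr.take n.toNat).drop i.toNat = [] := by
        apply List.drop_eq_nil_of_le
        simp [List.length_take]
        omega
      rw [pvWhile1]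
      have : ¬ i < n := by omega
      simp [this, hdrop, pvTw]
  | succ m ih =>
      intro i count flag hi hm
      have hin : i < n := by omega
      have hilen : i < (arr.length : Int) := by omega
      rw [pvWhile1]
      have hget := PySem.List.pyGet?_eq_some_getElem arr hi hilen
      have hlt : i.toNat < (arr.take n.toNat).length := by
        simp [List.length_take]; omega
      have hdrop : (arr.take n.toNat).drop i.toNat =
          arr[i.toNat] :: (arr.take n.toNat).drop (i.toNat + 1) := by
        rw [List.drop_eq_getElem_cons hlt]
        congr 1
        exact (List.getElem_take)
      by_cases hv : arr[i.toNat] ≤ k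
      · have hrec := ih (i + 1) (count + 1) (if arr[i.toNat] = k then 1 else flag)
          (by omega) (by omega)
        have hi1 : (i + 1).toNat = i.toNat + 1 := by omega
        rw [hdrop, pvTw_cons_le _ hv]
        simp only [hin, dif_pos, hget, hv, if_pos, hrec, hi1, Prod.mk.injEq]
        refine ⟨by simp only [List.length_cons]; push_cast; ring, ?_, by simp only [List.length_cons]; push_cast; ring⟩
        by_cases hm' : k ∈ pvTw k ((arr.take n.toNat).drop (i.toNat + 1))
        · simp [hm', List.mem_cons]
        · by_cases hk : arr[i.toNat] = k
          · simp [hm', hk, List.mem_cons]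
          · have : ¬ (k = arr[i.toNat]) := fun hh => hk hh.symm
            simp [hm', hk, List.mem_cons, this]
      · rw [hdrop, pvTw_cons_gt _ hv]
        simp [hin, hget, hv]

theorem sum_g_drop (k : Int) (l : List Int) :
    (List.range l.length).foldl (fun s j => s + pvG k (l.drop j)) 0 = pvSpec k l := by
  have main : ∀ (l : List Int) (c : Int),
      (List.range l.length).foldl (fun s j => s + pvG k (l.drop j)) c = c + pvSpec k l := by
    intro l
    induction l with
    | nil => intro c; simp [pvSpec]
    | cons x xs ih =>
        intro c
        rw [List.length_cons, List.range_succ_eq_map, List.foldl_cons, List.foldl_map]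
        simp only [List.drop_succ_cons, List.drop_zero]
        rw [ih]
        simp [pvSpec, pvG]
        ring
  simpa using main l 0

theorem SumLength_eq_spec (arr : List Int) (n k : Int) (hn : n ≤ (arr.length : Int)) :
    SumLength arr n k = pvSpec k (arr.take n.toNat) := by
  unfold SumLength
  rw [PySem.List.pyRange_one, List.foldl_map]
  have hnn : (n - 0).toNat = (arr.take n.toNat).length := by
    simp [List.length_take]; omega
  refine Eq.trans (PySem.List.foldl_congr_mem _ _
      (fun (s : Int) (j : Nat) => s + pvG k ((arr.take n.toNat).drop j)) 0 ?_) ?_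
  · intro s j hj
    have hj' : j < (n - 0).toNat := List.mem_range.mp hj
    have hj0 : (0 : Int) ≤ (0 : Int) + (j : Int) := by omega
    have hw := pvWhile1_eq arr n k hn (n - ((0 : Int) + (j : Int))).toNat ((0 : Int) + (j : Int)) 0 0 hj0 rfl
    have hjt : ((0 : Int) + (j : Int)).toNat = j := by omega
    rw [hjt] at hw
    simp only [hw, pvG]
    by_cases hm : k ∈ pvTw k ((arr.take n.toNat).drop j)
    · simp [hm]
    · simp [hm]
  · rw [hnn]
    exact sum_g_drop k (arr.take n.toNat)

-- ===== VERDICT (by name: the statement is the Claim_ definition above) =====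
theorem SumLength_spec : Claim_equal_SumLength := by
  intro arr n k _hd hpre
  unfold Spec_SumLength
  rw [SumLength_eq_spec arr n k hpre]
  unfold SumLength_alt
  have hmax : (max n 0).toNat = n.toNat := by omega
  rw [hmax, foldB]
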